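-- pv_equiv track=rewrite | github.com/foralcome/python | lesson4/lesson4_hometask_05.py | get_union_equations_data
-- ===== SOURCE A (Python) =====
-- def get_union_equations_data(equations_data_1, equations_data_2):
--     max_degree_equation_1 = len(equations_data_1)
--     max_degree_equation_2 = len(equations_data_2)
--     max_degree = max(max_degree_equation_1, max_degree_equation_2)
--     union_data = []
--     for i in range(max_degree):
--         if i < max_degree_equation_1 and i < max_degree_equation_2:
--             union_data.append(equations_data_1[i] + equations_data_2[i])
--         elif i < max_degree_equation_1:
--             union_data.append(equations_data_1[i])
--         else:
--             union_data.append(equations_data_2[i])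
--     return union_data
-- ===== SOURCE B (Python) =====
-- def get_union_equations_data(equations_data_1, equations_data_2):
--     if len(equations_data_1) >= len(equations_data_2):
--         result = list(equations_data_1)
--     else:
--         result = list(equations_data_2)
--     for i in range(min(len(equations_data_1), len(equations_data_2))):
--         result[i] = equations_data_1[i] + equations_data_2[i]
--     return result
-- ===== Notes on version B (the rewrite author's own statement) =====
-- stated objective: simpler
-- what changed: B copies the longer list once and overwrites only the overlapping prefix with elementwise sums, replacing A's per-index three-way branch over the whole max-length range.
import Mathlib
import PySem

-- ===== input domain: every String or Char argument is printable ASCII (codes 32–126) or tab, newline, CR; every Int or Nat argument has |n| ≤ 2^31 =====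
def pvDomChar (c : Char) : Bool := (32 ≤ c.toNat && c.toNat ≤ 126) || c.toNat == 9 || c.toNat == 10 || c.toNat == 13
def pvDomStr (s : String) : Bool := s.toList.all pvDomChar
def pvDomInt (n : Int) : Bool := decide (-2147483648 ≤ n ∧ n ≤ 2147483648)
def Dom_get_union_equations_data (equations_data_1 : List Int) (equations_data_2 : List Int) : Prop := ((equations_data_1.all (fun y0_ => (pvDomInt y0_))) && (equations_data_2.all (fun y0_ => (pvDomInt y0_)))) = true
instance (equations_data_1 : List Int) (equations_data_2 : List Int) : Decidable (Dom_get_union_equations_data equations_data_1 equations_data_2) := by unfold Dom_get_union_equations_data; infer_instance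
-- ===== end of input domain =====

-- B copies the longer list and overwrites only the overlapping prefix with sums,
-- instead of A's per-index three-way branch over the whole range (objective: simpler decomposition).

-- ===== PORT A =====
def get_union_equations_data (equations_data_1 : List Int) (equations_data_2 : List Int) : List Int :=
  let max_degree_equation_1 : Int := equations_data_1.length
  let max_degree_equation_2 : Int := equations_data_2.length
  let max_degree := max max_degree_equation_1 max_degree_equation_2
  (PySem.List.pyRange 0 max_degree).foldl (fun union_data i =>
    if i < max_degree_equation_1 ∧ i < max_degree_equation_2 then
      union_data ++ [PySem.List.pyGetD equations_data_1 i 0 + PySem.List.pyGetD equations_data_2 i 0]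
    else if i < max_degree_equation_1 then
      union_data ++ [PySem.List.pyGetD equations_data_1 i 0]
    else
      union_data ++ [PySem.List.pyGetD equations_data_2 i 0]) []

-- ===== PORT B =====
def get_union_equations_data_alt (equations_data_1 : List Int) (equations_data_2 : List Int) : List Int :=
  let result := if (equations_data_2.length : Int) ≤ (equations_data_1.length : Int)
                then equations_data_1 else equations_data_2
  (PySem.List.pyRange 0 (min (equations_data_1.length : Int) (equations_data_2.length : Int))).foldl
    (fun result i =>
      result.set i.toNat (PySem.List.pyGetD equations_data_1 i 0 + PySem.List.pyGetD equations_data_2 i 0))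
    result

-- ===== PRECONDITION & SPEC =====
def Spec_get_union_equations_data (equations_data_1 : List Int) (equations_data_2 : List Int) (out : List Int) : Prop := out = get_union_equations_data_alt equations_data_1 equations_data_2
instance (equations_data_1 : List Int) (equations_data_2 : List Int) (out : List Int) : Decidable (Spec_get_union_equations_data equations_data_1 equations_data_2 out) := by unfold Spec_get_union_equations_data; infer_instance

-- ===== CLAIM (what is proved, stated in full; the proofs are below) =====
def Claim_equal_get_union_equations_data : Prop := ∀ (equations_data_1 : List Int) (equations_data_2 : List Int), Dom_get_union_equations_data equations_data_1 equations_data_2 → Spec_get_union_equations_data equations_data_1 equations_data_2 (get_union_equations_data equations_data_1 equations_data_2)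

-- ===== LEMMAS AND PROOFS =====

-- A's loop appends one element per index: it is a map over the range.
theorem portA_eq_map (l1 l2 : List Int) :
    get_union_equations_data l1 l2 =
      (List.range (max l1.length l2.length)).map (fun (k : Nat) =>
        if ((k : Int) < (l1.length : Int) ∧ (k : Int) < (l2.length : Int)) then
          PySem.List.pyGetD l1 (k : Int) 0 + PySem.List.pyGetD l2 (k : Int) 0
        else if (k : Int) < (l1.length : Int) then PySem.List.pyGetD l1 (k : Int) 0
        else PySem.List.pyGetD l2 (k : Int) 0) := by
  unfold get_union_equations_data
  simp only []
  have hmax : (max (l1.length : Int) (l2.length : Int)) = ((max l1.length l2.length : Nat) : Int) := by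
    push_cast; rfl
  rw [hmax, PySem.List.pyRange_zero_natCast, List.foldl_map]
  have hbody : ∀ (acc : List Int) (k : Nat),
      (fun (union_data : List Int) (i : Int) =>
        if i < (l1.length : Int) ∧ i < (l2.length : Int) then
          union_data ++ [PySem.List.pyGetD l1 i 0 + PySem.List.pyGetD l2 i 0]
        else if i < (l1.length : Int) then union_data ++ [PySem.List.pyGetD l1 i 0]
        else union_data ++ [PySem.List.pyGetD l2 i 0]) acc (k : Int) =
      acc ++ [if ((k : Int) < (l1.length : Int) ∧ (k : Int) < (l2.length : Int)) then
          PySem.List.pyGetD l1 (k : Int) 0 + PySem.List.pyGetD l2 (k : Int) 0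
        else if (k : Int) < (l1.length : Int) then PySem.List.pyGetD l1 (k : Int) 0
        else PySem.List.pyGetD l2 (k : Int) 0] := by
    intro acc k; dsimp only; split_ifs <;> rfl
  simp only [hbody]
  rw [PySem.List.foldl_append_singleton_eq_map]
  rfl

-- B's loop sets one index per step (over a Nat range).
theorem setLoop_eq (l1 l2 : List Int) (k : Nat) (acc : List Int) :
    (PySem.List.pyRange 0 (k : Int)).foldl
      (fun result i =>
        result.set i.toNat (PySem.List.pyGetD l1 i 0 + PySem.List.pyGetD l2 i 0)) acc =
    (List.range k).foldl
      (fun result j =>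
        result.set j (PySem.List.pyGetD l1 (j : Int) 0 + PySem.List.pyGetD l2 (j : Int) 0)) acc := by
  rw [PySem.List.pyRange_zero_natCast, List.foldl_map]
  simp only [Int.toNat_natCast]

-- a set-at-index loop over range preserves the length
theorem setLoop_length {f : Nat → Int} (k : Nat) (acc : List Int) :
    ((List.range k).foldl (fun result j => result.set j (f j)) acc).length = acc.length := by
  induction k generalizing acc with
  | zero => rfl
  | succ n ih =>
    rw [List.range_succ, List.foldl_append]
    simp only [List.foldl_cons, List.foldl_nil, List.length_set]
    exact ih acc

-- getElem? after a set-at-index loop over range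
theorem setLoop_getElem? {f : Nat → Int} (k : Nat) (acc : List Int) (j : Nat) :
    ((List.range k).foldl (fun result j => result.set j (f j)) acc)[j]? =
    if j < k ∧ j < acc.length then some (f j) else acc[j]? := by
  induction k with
  | zero => simp
  | succ n ih =>
    rw [List.range_succ, List.foldl_append]
    simp only [List.foldl_cons, List.foldl_nil]
    rw [List.getElem?_set]
    by_cases hj : n = j
    · subst hj
      rw [if_pos rfl, setLoop_length]
      by_cases hn : n < acc.length
      · rw [if_pos hn, if_pos (show n < n + 1 ∧ n < acc.length from ⟨by omega, hn⟩)]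
      · rw [if_neg hn, if_neg (show ¬ (n < n + 1 ∧ n < acc.length) by omega),
          List.getElem?_eq_none (by omega)]
    · rw [if_neg hj, ih]
      by_cases hjn : j < n ∧ j < acc.length
      · rw [if_pos hjn, if_pos (show j < n + 1 ∧ j < acc.length from ⟨by omega, hjn.2⟩)]
      · rw [if_neg hjn, if_neg (show ¬ (j < n + 1 ∧ j < acc.length) by omega)]

theorem ports_agree (l1 l2 : List Int) :
    get_union_equations_data l1 l2 = get_union_equations_data_alt l1 l2 := by
  rw [portA_eq_map]
  unfold get_union_equations_data_alt
  simp only []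
  have hmin : (min (l1.length : Int) (l2.length : Int)) = ((min l1.length l2.length : Nat) : Int) := by
    push_cast; rfl
  rw [hmin, setLoop_eq]
  apply List.ext_getElem?
  intro j
  rw [setLoop_getElem?]
  by_cases hc : l2.length ≤ l1.length
  · rw [if_pos (show (l2.length : Int) ≤ (l1.length : Int) from by exact_mod_cast hc)]
    by_cases hjm : j < l1.length
    · rw [List.getElem?_map, List.getElem?_range (by omega), Option.map_some]
      simp only [Nat.cast_lt]
      split_ifs <;>
        first
          | rfl
          | omega
          | simp [PySem.List.pyGetD_natCast, List.getElem?_eq_getElem hjm]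
    · rw [List.getElem?_map,
        List.getElem?_eq_none (by rw [List.length_range]; omega), Option.map_none,
        if_neg (show ¬ (j < min l1.length l2.length ∧ j < l1.length) by omega),
        List.getElem?_eq_none (by omega)]
  · rw [if_neg (show ¬ ((l2.length : Int) ≤ (l1.length : Int)) from fun h => hc (by exact_mod_cast h))]
    by_cases hjm : j < l2.length
    · rw [List.getElem?_map, List.getElem?_range (by omega), Option.map_some]
      simp only [Nat.cast_lt]
      split_ifs <;>
        first
          | rfl
          | omega
          | simp [PySem.List.pyGetD_natCast, List.getElem?_eq_getElem hjm]
    · rw [List.getElem?_map,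
        List.getElem?_eq_none (by rw [List.length_range]; omega), Option.map_none,
        if_neg (show ¬ (j < min l1.length l2.length ∧ j < l2.length) by omega),
        List.getElem?_eq_none (by omega)]

-- ===== VERDICT (by name: the statement is the Claim_ definition above) =====
theorem get_union_equations_data_spec : Claim_equal_get_union_equations_data := by
  intro l1 l2 _
  exact ports_agree l1 l2
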